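-- pv_equiv track=rewrite | github.com/BDP26/pm4-iAM-Scout | web_scraping/transfermarkt/parser/matches.py | _first_two_unique
-- ===== SOURCE A (Python) =====
-- def _first_two_unique(xs: list[str]) -> tuple[str, str] | None:
--     seen = set()
--     out = []
--     for x in xs:
--         if x in seen:
--             continue
--         seen.add(x)
--         out.append(x)
--         if len(out) == 2:
--             return out[0], out[1]
--     return None
-- ===== SOURCE B (Python) =====
-- def _first_two_unique(xs: list[str]) -> tuple[str, str] | None:
--     if not xs:
--         return None
--     first = xs[0]
--     for x in xs[1:]:
--         if x != first:
--             return (first, x)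
--     return None
-- ===== Notes on version B (the rewrite author's own statement) =====
-- stated objective: simpler
-- what changed: Drops the seen-set and accumulator list: the first distinct value is always xs[0], so B keeps one scalar and scans the tail for the first element differing from it.
import Mathlib
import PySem

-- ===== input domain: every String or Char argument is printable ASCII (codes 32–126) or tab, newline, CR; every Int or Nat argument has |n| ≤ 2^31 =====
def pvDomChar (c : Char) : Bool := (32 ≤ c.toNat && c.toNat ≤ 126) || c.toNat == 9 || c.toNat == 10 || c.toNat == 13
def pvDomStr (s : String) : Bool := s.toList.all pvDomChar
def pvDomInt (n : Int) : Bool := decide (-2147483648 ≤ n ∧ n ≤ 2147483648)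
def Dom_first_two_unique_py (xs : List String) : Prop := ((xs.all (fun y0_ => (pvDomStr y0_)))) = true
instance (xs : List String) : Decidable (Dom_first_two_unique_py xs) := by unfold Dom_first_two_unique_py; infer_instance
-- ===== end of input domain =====

-- B replaces A's seen-set and accumulator list with a single scalar (the first element) and a
-- scan of the tail for the first element differing from it; same return value, simpler bookkeeping.

-- ===== PORT A =====
-- the for-loop of A, carrying the seen set and the out list
def ftuLoop (xs : List String) (seen : PySem.Set String) (out : List String) :
    Option (String × String) :=
  match xs with
  | [] => none
  | x :: rest =>
    if PySem.Set.contains seen x then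
      ftuLoop rest seen out
    else
      let seen' := PySem.Set.add seen x
      let out' := out ++ [x]
      if out'.length = 2 then some (out'.getD 0 "", out'.getD 1 "")
      else ftuLoop rest seen' out'

def first_two_unique_py (xs : List String) : Option (String × String) :=
  ftuLoop xs PySem.Set.empty []

-- ===== PORT B =====
-- the for-loop of B over xs[1:], carrying only the first element
def ftuScan (xs : List String) (first : String) : Option (String × String) :=
  match xs with
  | [] => none
  | x :: rest => if x ≠ first then some (first, x) else ftuScan rest first

def first_two_unique_py_alt (xs : List String) : Option (String × String) :=
  match xs with
  | [] => none
  | first :: rest => ftuScan rest first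

-- ===== PRECONDITION & SPEC =====
def Spec_first_two_unique_py (xs : List String) (out : Option (String × String)) : Prop := out = first_two_unique_py_alt xs
instance (xs : List String) (out : Option (String × String)) : Decidable (Spec_first_two_unique_py xs out) := by unfold Spec_first_two_unique_py; infer_instance

-- ===== CLAIM (what is proved, stated in full; the proofs are below) =====
def Claim_equal_first_two_unique_py : Prop := ∀ (xs : List String), Dom_first_two_unique_py xs → Spec_first_two_unique_py xs (first_two_unique_py xs)

-- ===== LEMMAS AND PROOFS =====

-- After A has processed the first element, its seen set is {first} and its out list is [first];
-- from there A's loop is exactly B's scan for the first element ≠ first.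
theorem ftuLoop_eq_scan (rest : List String) (first : String) :
    ftuLoop rest [first] [first] = ftuScan rest first := by
  induction rest with
  | nil => rfl
  | cons x rs ih =>
    by_cases h : x = first
    · subst h
      simp [ftuLoop, ftuScan, PySem.Set.contains, ih]
    · simp [ftuLoop, ftuScan, PySem.Set.contains, h]

-- ===== VERDICT (by name: the statement is the Claim_ definition above) =====
theorem first_two_unique_py_spec : Claim_equal_first_two_unique_py := by
  intro xs _
  unfold Spec_first_two_unique_py
  match xs with
  | [] => rfl
  | first :: rest =>
    show ftuLoop (first :: rest) PySem.Set.empty [] = _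
    simp [ftuLoop, PySem.Set.contains, PySem.Set.empty, PySem.Set.add,
      first_two_unique_py_alt]
    exact ftuLoop_eq_scan rest first
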